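-- pv_equiv track=rewrite | github.com/dsgoficial/SAP_Operador | managerLoadLayers/loadLayers.py | sortFieldsLayer
-- ===== SOURCE A (Python) =====
-- def sortFieldsLayer(fields):
--     fieldsSorted = []
--     if u'nome' in fields:
--         fieldsSorted.append(u'nome')
--     if u'filter' in fields:
--         fieldsSorted.append(u'filter')
--         fieldsSorted.append(u'tipo')
--     for field in fields:
--         if not(field in fieldsSorted):
--             fieldsSorted.append(field)
--     return fieldsSorted
-- ===== SOURCE B (Python) =====
-- def sortFieldsLayer(fields):
--     fields = list(fields)
--     pool = set(fields)
--     if u'filter' in pool: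
--         pool.add(u'tipo')
--     def rank(f):
--         if f == u'nome':
--             return 0
--         if f == u'filter':
--             return 1
--         if f == u'tipo' and u'filter' in fields:
--             return 2
--         return 3 + fields.index(f)
--     return sorted(pool, key=rank)
-- ===== Notes on version B (the rewrite author's own statement) =====
-- stated objective: alternative
-- what changed: B replaces A's grow-and-membership-scan append loop by a rank-and-sort algorithm: it builds the set of distinct fields (injecting 'tipo' when 'filter' is present), assigns each field a numeric rank (priority fields 0/1/2, others 3 plus their first-occurrence index) and sorts the set by that rank.
import Mathlib
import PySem

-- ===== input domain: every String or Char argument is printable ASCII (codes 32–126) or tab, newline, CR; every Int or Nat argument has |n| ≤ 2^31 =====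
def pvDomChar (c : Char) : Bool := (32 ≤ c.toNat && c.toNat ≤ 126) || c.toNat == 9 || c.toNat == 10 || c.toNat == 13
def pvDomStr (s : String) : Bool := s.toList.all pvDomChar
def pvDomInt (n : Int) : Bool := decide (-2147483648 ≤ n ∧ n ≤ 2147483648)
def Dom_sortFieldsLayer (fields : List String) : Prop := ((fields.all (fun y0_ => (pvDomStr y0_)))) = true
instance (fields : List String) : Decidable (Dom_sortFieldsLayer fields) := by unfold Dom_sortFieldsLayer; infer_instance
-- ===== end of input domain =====

-- B replaces A's append-with-membership-scan loop by a rank-and-sort algorithm: each distinct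
-- field gets a numeric rank (priority fields 0/1/2, others 3 + first-occurrence index) and the
-- distinct pool is sorted by that rank (different algorithm; no speed claim).

-- ===== PORT A =====
def sortFieldsLayer (fields : List String) : List String :=
  let fieldsSorted : List String := []
  let fieldsSorted := if "nome" ∈ fields then fieldsSorted ++ ["nome"] else fieldsSorted
  let fieldsSorted :=
    if "filter" ∈ fields then (fieldsSorted ++ ["filter"]) ++ ["tipo"] else fieldsSorted
  fields.foldl (fun acc field => if field ∈ acc then acc else acc ++ [field]) fieldsSorted

-- ===== PORT B =====
-- rank(f) of Source B; in the last branch f is always a member of fields (pool minus the injected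
-- 'tipo' comes from fields), so fields.index(f) never raises and index?.getD 0 is exact there.
def pvRank (fields : List String) (f : String) : Int :=
  if f = "nome" then 0
  else if f = "filter" then 1
  else if f = "tipo" ∧ "filter" ∈ fields then 2
  else 3 + ((PySem.List.index? fields f).getD 0 : Nat)

def sortFieldsLayer_alt (fields : List String) : List String :=
  let pool : PySem.Set String := PySem.Set.ofList fields
  let pool := if "filter" ∈ pool then PySem.Set.add pool "tipo" else pool
  -- sorted(pool, key=rank): rank is injective on pool, so the result does not depend on
  -- the set's iteration order (PySem's stated condition for sorting a set with a key)
  PySem.List.sorted pool (pvRank fields)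

-- ===== PRECONDITION & SPEC =====
def Spec_sortFieldsLayer (fields : List String) (out : List String) : Prop := out = sortFieldsLayer_alt fields
instance (fields : List String) (out : List String) : Decidable (Spec_sortFieldsLayer fields out) := by unfold Spec_sortFieldsLayer; infer_instance

-- ===== CLAIM (what is proved, stated in full; the proofs are below) =====
def Claim_equal_sortFieldsLayer : Prop := ∀ (fields : List String), Dom_sortFieldsLayer fields → Spec_sortFieldsLayer fields (sortFieldsLayer fields)

-- ===== LEMMAS AND PROOFS =====

-- A's loop body is exactly Python set insertion (PySem.Set.add).
theorem pvStep_eq_add (acc : List String) (x : String) :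
    (if x ∈ acc then acc else acc ++ [x]) = PySem.Set.add acc x := by
  simp [PySem.Set.add, PySem.Set.contains]

-- A's result is the ordered dedup of prefix ++ fields.
theorem pvA_eq_ofList (fields : List String) :
    sortFieldsLayer fields =
      PySem.Set.ofList
        ((if "nome" ∈ fields then ["nome"] else []) ++
         (if "filter" ∈ fields then ["filter", "tipo"] else []) ++ fields) := by
  unfold sortFieldsLayer
  rw [PySem.Set.ofList_eq_foldl, List.foldl_append, List.foldl_append]
  rw [show (fun (acc : List String) field => if field ∈ acc then acc else acc ++ [field])
        = PySem.Set.add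
      from funext fun acc => funext fun x => pvStep_eq_add acc x]
  split_ifs <;> rfl

-- folding Set.add over l onto a seen-set s appends the unseen first occurrences, in order
theorem pvFoldl_add (l s : List String) :
    List.foldl PySem.Set.add s l =
      s ++ (PySem.Set.ofList l).filter (fun x => decide (x ∉ s)) := by
  induction l generalizing s with
  | nil => simp [PySem.Set.ofList]
  | cons x l ih =>
    have hx : PySem.Set.ofList (x :: l) = x :: (PySem.Set.ofList l).filter (fun y => decide (y ≠ x)) := by
      rw [PySem.Set.ofList_eq_foldl, List.foldl_cons,
          show PySem.Set.add [] x = [x] from by simp [PySem.Set.add, PySem.Set.contains], ih]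
      simp
    rw [List.foldl_cons, ih, hx]
    by_cases hmem : x ∈ s
    · have : PySem.Set.add s x = s := by simp [PySem.Set.add, PySem.Set.contains, hmem]
      rw [this]
      simp only [List.filter_cons]
      have : (decide (x ∉ s)) = false := by simp [hmem]
      rw [this, List.filter_filter]
      congr 1
      apply List.filter_congr
      intro y _
      by_cases hyx : y = x <;> simp [hyx, hmem]
    · have : PySem.Set.add s x = s ++ [x] := by simp [PySem.Set.add, PySem.Set.contains, hmem]
      rw [this]
      simp only [List.filter_cons]
      have : (decide (x ∉ s)) = true := by simp [hmem]
      rw [this, List.filter_filter, List.append_assoc, List.singleton_append]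
      congr 2
      apply List.filter_congr
      intro y _
      by_cases hyx : y = x
      · subst hyx; simp [hmem]
      · simp [hyx]

theorem pvOfList_cons (x : String) (l : List String) :
    PySem.Set.ofList (x :: l) = x :: (PySem.Set.ofList l).filter (fun y => decide (y ≠ x)) := by
  rw [PySem.Set.ofList_eq_foldl, List.foldl_cons,
      show PySem.Set.add [] x = [x] from by simp [PySem.Set.add, PySem.Set.contains], pvFoldl_add]
  simp

-- the ordered dedup lists first occurrences in strictly increasing index order
theorem pvOfList_pairwise_idxOf (l : List String) :
    (PySem.Set.ofList l).Pairwise (fun a b => l.idxOf a < l.idxOf b) := by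
  induction l with
  | nil => simp [PySem.Set.ofList]
  | cons x l ih =>
    rw [pvOfList_cons]
    constructor
    · intro b hb
      have hbne : (x == b) = false := by
        have : b ≠ x := by simpa using List.of_mem_filter hb
        exact beq_eq_false_iff_ne.mpr (Ne.symm this)
      simp [List.idxOf_cons, hbne]
    · have hsub : ((PySem.Set.ofList l).filter (fun y => decide (y ≠ x))).Pairwise
          (fun a b => l.idxOf a < l.idxOf b) :=
        (ih.sublist List.filter_sublist)
      apply hsub.imp_of_mem
      intro a b ha hb hab
      have hane : (x == a) = false := by
        have : a ≠ x := by simpa using List.of_mem_filter ha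
        exact beq_eq_false_iff_ne.mpr (Ne.symm this)
      have hbne : (x == b) = false := by
        have : b ≠ x := by simpa using List.of_mem_filter hb
        exact beq_eq_false_iff_ne.mpr (Ne.symm this)
      simp [List.idxOf_cons, hane, hbne]
      omega

-- generic shape: dedup (pfx ++ l) is rank-strictly-increasing when pfx is ranked < 3 in order
-- and every remaining field is ranked 3 + its first index
theorem pvPairwise_main (pfx l : List String) (r : String → Int)
    (hnd : PySem.Set.ofList pfx = pfx)
    (h1 : pfx.Pairwise (fun a b => r a < r b))
    (h2 : ∀ a ∈ pfx, r a < 3)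
    (h3 : ∀ b ∈ l, b ∉ pfx → r b = 3 + l.idxOf b) :
    (PySem.Set.ofList (pfx ++ l)).Pairwise (fun a b => r a < r b) := by
  rw [PySem.Set.ofList_eq_foldl, List.foldl_append, ← PySem.Set.ofList_eq_foldl, hnd, pvFoldl_add]
  rw [List.pairwise_append]
  refine ⟨h1, ?_, ?_⟩
  · have hsub : ((PySem.Set.ofList l).filter (fun x => decide (x ∉ pfx))).Pairwise
        (fun a b => l.idxOf a < l.idxOf b) :=
      ((pvOfList_pairwise_idxOf l).sublist List.filter_sublist)
    apply hsub.imp_of_mem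
    intro a b ha hb hab
    have hal : a ∈ l := (PySem.Set.mem_ofList l a).mp (List.mem_of_mem_filter ha)
    have hbl : b ∈ l := (PySem.Set.mem_ofList l b).mp (List.mem_of_mem_filter hb)
    have hap : a ∉ pfx := by simpa using List.of_mem_filter ha
    have hbp : b ∉ pfx := by simpa using List.of_mem_filter hb
    rw [h3 a hal hap, h3 b hbl hbp]
    omega
  · intro a ha b hb
    have hbl : b ∈ l := (PySem.Set.mem_ofList l b).mp (List.mem_of_mem_filter hb)
    have hbp : b ∉ pfx := by simpa using List.of_mem_filter hb
    have := h2 a ha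
    rw [h3 b hbl hbp]
    omega

-- rank agrees with 3 + first index on non-priority fields
theorem pvRank_other (fields : List String) (b : String) (hb : b ∈ fields)
    (hn : b ≠ "nome") (hf : b ≠ "filter") (ht : ¬ (b = "tipo" ∧ "filter" ∈ fields)) :
    pvRank fields b = 3 + fields.idxOf b := by
  obtain ⟨k, hk⟩ : ∃ k, List.idxOf? b fields = some k := by
    cases h : List.idxOf? b fields with
    | none => exact absurd (List.idxOf?_eq_none_iff.mp h) (by simp [hb])
    | some k => exact ⟨k, rfl⟩
  have hidx : List.idxOf b fields = k := by rw [List.idxOf_eq_getD_idxOf?, hk]; rfl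
  simp [pvRank, hn, hf, ht, PySem.List.index?_eq_idxOf?, hk, hidx]

theorem pvNodup_pool (fields : List String) :
    (if "filter" ∈ PySem.Set.ofList fields
      then PySem.Set.add (PySem.Set.ofList fields) "tipo"
      else PySem.Set.ofList fields).Nodup := by
  split_ifs with h
  · by_cases ht : "tipo" ∈ PySem.Set.ofList fields
    · simpa [PySem.Set.add, PySem.Set.contains, ht] using PySem.Set.nodup_ofList fields
    · simp only [PySem.Set.add, PySem.Set.contains]
      rw [if_neg (by simpa using ht)]
      exact List.Nodup.append (PySem.Set.nodup_ofList fields) (List.nodup_singleton _)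
        (by simpa [List.disjoint_singleton] using ht)
  · exact PySem.Set.nodup_ofList fields

-- ===== VERDICT (by name: the statement is the Claim_ definition above) =====
theorem sortFieldsLayer_spec : Claim_equal_sortFieldsLayer := by
  intro fields _
  unfold Spec_sortFieldsLayer sortFieldsLayer_alt
  rw [pvA_eq_ofList]
  set pfx : List String :=
    (if "nome" ∈ fields then ["nome"] else []) ++
    (if "filter" ∈ fields then ["filter", "tipo"] else []) with hpfx
  refine (PySem.List.sorted_eq_of_perm_of_pairwise_lt
    (if "filter" ∈ PySem.Set.ofList fields
      then PySem.Set.add (PySem.Set.ofList fields) "tipo"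
      else PySem.Set.ofList fields)
    (PySem.Set.ofList (pfx ++ fields)) (pvRank fields) ?_ ?_).symm
  · -- permutation: both sides are nodup with the same members
    rw [List.perm_ext_iff_of_nodup (PySem.Set.nodup_ofList _) (pvNodup_pool fields)]
    intro a
    have hpool : ∀ b : String,
        (b ∈ if "filter" ∈ PySem.Set.ofList fields
              then PySem.Set.add (PySem.Set.ofList fields) "tipo"
              else PySem.Set.ofList fields)
          ↔ (b ∈ fields ∨ (b = "tipo" ∧ "filter" ∈ fields)) := by
      intro b
      split_ifs with h <;>
        rw [PySem.Set.mem_ofList] at h <;>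
        simp [PySem.Set.mem_add, PySem.Set.mem_ofList, h] <;> tauto
    have hpfxmem : a ∈ pfx ↔
        ((a = "nome" ∧ "nome" ∈ fields) ∨ ((a = "filter" ∨ a = "tipo") ∧ "filter" ∈ fields)) := by
      rw [hpfx]
      by_cases h1 : "nome" ∈ fields <;> by_cases h2 : "filter" ∈ fields <;>
        simp [h1, h2]
    rw [PySem.Set.mem_ofList, List.mem_append, hpool, hpfxmem]
    constructor
    · rintro ((⟨rfl, h⟩ | ⟨(rfl | rfl), h⟩) | hf)
      · exact Or.inl h
      · exact Or.inl h
      · exact Or.inr ⟨rfl, h⟩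
      · exact Or.inl hf
    · rintro (hf | ⟨rfl, h⟩)
      · exact Or.inr hf
      · exact Or.inl (Or.inr ⟨Or.inr rfl, h⟩)
  · -- strict rank increase along A's output
    apply pvPairwise_main
    · rw [hpfx]; split_ifs <;> rfl
    · rw [hpfx]
      by_cases h1 : "nome" ∈ fields <;> by_cases h2 : "filter" ∈ fields <;>
        simp [h1, h2, List.pairwise_cons, pvRank]
    · intro a ha
      rw [hpfx] at ha
      by_cases h1 : "nome" ∈ fields <;> by_cases h2 : "filter" ∈ fields <;>
        simp [h1, h2] at ha
      · rcases ha with rfl | rfl | rfl <;> simp [pvRank, h2]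
      · subst ha; simp [pvRank]
      · rcases ha with rfl | rfl <;> simp [pvRank, h2]
    · intro b hb hbp
      rw [hpfx] at hbp
      by_cases h1 : "nome" ∈ fields <;> by_cases h2 : "filter" ∈ fields <;>
        simp only [h1, h2, if_true, if_false, List.mem_append, List.mem_cons,
          List.not_mem_nil, not_or, or_false, false_or] at hbp <;>
        refine pvRank_other fields b hb ?_ ?_ ?_ <;>
        first
          | tauto
          | (rintro rfl; tauto)
          | (rintro ⟨rfl, hc⟩; tauto)
          | (rintro rfl; exact h1 hb)
          | (rintro rfl; exact h2 hb)
          | (rintro ⟨rfl, hc⟩; exact h2 hc)
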